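-- pv_equiv track=rewrite | github.com/shimuraii/Mini-Projects | lone_sum.py | lone_sum
-- ===== SOURCE A (Python) =====
-- def lone_sum(a, b, c):
--   sum = 0
--   l = [b, c]
--   if a != b and a != c and b != c:
--     return a + b + c
--   if b == c and a != c and a != b:
--     return a
--   for i in l:
--     if a == i:
--       sum += 0
--     else:
--       sum += i
--   return sum
-- ===== SOURCE B (Python) =====
-- def lone_sum(a, b, c):
--     nums = [a, b, c]
--     return sum(x for x in nums if nums.count(x) == 1)
-- ===== Notes on version B (the rewrite author's own statement) =====
-- stated objective: simpler
-- what changed: Replaces A's hand-written pairwise branch analysis and residual loop with a single frequency-based filter-sum: sum the values that occur exactly once in [a,b,c].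
import Mathlib
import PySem

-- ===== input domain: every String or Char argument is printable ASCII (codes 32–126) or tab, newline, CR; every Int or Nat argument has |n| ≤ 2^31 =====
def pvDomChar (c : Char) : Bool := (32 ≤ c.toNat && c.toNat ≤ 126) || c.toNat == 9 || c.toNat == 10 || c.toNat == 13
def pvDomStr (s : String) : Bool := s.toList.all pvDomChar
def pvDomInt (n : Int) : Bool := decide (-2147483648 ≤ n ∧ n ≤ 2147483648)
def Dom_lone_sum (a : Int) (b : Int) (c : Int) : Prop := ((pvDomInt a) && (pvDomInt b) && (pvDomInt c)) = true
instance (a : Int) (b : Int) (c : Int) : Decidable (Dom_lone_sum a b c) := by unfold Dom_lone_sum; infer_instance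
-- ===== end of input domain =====

-- B replaces A's hand-written pairwise branches and residual loop with a frequency-based
-- filter-sum (keep the values occurring exactly once); objective: simpler.


-- ===== PORT A =====
def lone_sum (a : Int) (b : Int) (c : Int) : Int :=
  let sum : Int := 0
  let l : List Int := [b, c]
  if a ≠ b ∧ a ≠ c ∧ b ≠ c then a + b + c
  else if b = c ∧ a ≠ c ∧ a ≠ b then a
  else l.foldl (fun sum i => if a = i then sum + 0 else sum + i) sum

-- ===== PORT B =====
def lone_sum_alt (a : Int) (b : Int) (c : Int) : Int :=
  let nums : List Int := [a, b, c]
  (nums.filter (fun x => PySem.List.count nums x == 1)).sum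

-- ===== PRECONDITION & SPEC =====
def Spec_lone_sum (a : Int) (b : Int) (c : Int) (out : Int) : Prop := out = lone_sum_alt a b c
instance (a : Int) (b : Int) (c : Int) (out : Int) : Decidable (Spec_lone_sum a b c out) := by unfold Spec_lone_sum; infer_instance

-- ===== CLAIM (what is proved, stated in full; the proofs are below) =====
def Claim_equal_lone_sum : Prop := ∀ (a : Int) (b : Int) (c : Int), Dom_lone_sum a b c → Spec_lone_sum a b c (lone_sum a b c)

-- ===== LEMMAS AND PROOFS =====

-- ===== VERDICT (by name: the statement is the Claim_ definition above) =====
theorem lone_sum_spec : Claim_equal_lone_sum := by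
  intro a b c _
  unfold Spec_lone_sum lone_sum lone_sum_alt PySem.List.count
  simp only [List.filter, List.count, List.countP, List.countP.go, cond, List.sum, List.foldl]
  repeat' split
  all_goals simp_all [beq_eq_decide, eq_comm]
  all_goals omega
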